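-- pv_equiv track=rewrite | github.com/Bombardlos/Kobon_Triangle_Workspace | compile_11(new,more_efficient).py | initialize_lists_and_pairs
-- ===== SOURCE A (Python) =====
-- def apply_swaps(lst, swaps):
--     for a, b in swaps:
--         try:
--             index = lst.index(a)
--             if index < len(lst) - 1 and lst[index + 1] == b:
--                 lst[index], lst[index + 1] = lst[index + 1], lst[index]
--         except ValueError:
--             continue
--
-- def initialize_lists_and_pairs(k):
--     k_minus = k - 1
--     list_1 = list(range(1, k_minus + 1))
--     list_2 = list(range(1, k_minus + 1))
--
--     # Pre-populate swapped_pairs_1 and swapped_pairs_2 with initial pairs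
--     swapped_pairs_1 = [(i, i + 1) for i in range(1, k_minus - 1, 2)]
--     swapped_pairs_2 = [(i, i + 1) for i in range(2, k_minus, 2)]
--     if k_minus % 2 == 0:
--         swapped_pairs_1 = [(i, i + 1) for i in range(1, k_minus, 2)]
--
--     # Apply the prefilled swaps to list_1 and list_2
--     apply_swaps(list_1, swapped_pairs_1)
--     apply_swaps(list_2, swapped_pairs_2)
--
--     return list_1, list_2
-- ===== SOURCE B (Python) =====
-- def initialize_lists_and_pairs(k):
--     # Build each permutation directly: append the swapped pairs in one pass,
--     # no identity list, no lst.index scans.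
--     n = k - 1
--
--     def swapped(start, prefix):
--         out = prefix
--         i = start
--         while i + 1 <= n:
--             out.append(i + 1)
--             out.append(i)
--             i += 2
--         if i <= n:
--             out.append(i)
--         return out
--
--     return swapped(1, []), swapped(2, [1] if n >= 1 else [])
-- ===== Notes on version B (the rewrite author's own statement) =====
-- stated objective: faster
-- what changed: B emits each permutation directly in one pass (appending i+1,i for each swapped pair) instead of building an identity list and applying each swap via a linear lst.index scan.
import Mathlib
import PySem

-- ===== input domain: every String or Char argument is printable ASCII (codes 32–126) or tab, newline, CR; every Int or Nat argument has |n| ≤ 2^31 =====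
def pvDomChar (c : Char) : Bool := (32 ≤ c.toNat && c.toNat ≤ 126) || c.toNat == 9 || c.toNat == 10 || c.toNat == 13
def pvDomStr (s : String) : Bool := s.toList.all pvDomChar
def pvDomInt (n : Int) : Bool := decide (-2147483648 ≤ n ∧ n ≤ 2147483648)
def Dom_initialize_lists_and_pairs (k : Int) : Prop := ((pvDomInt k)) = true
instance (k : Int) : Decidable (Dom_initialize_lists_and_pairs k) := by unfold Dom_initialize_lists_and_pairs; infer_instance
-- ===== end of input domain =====

-- B builds each permutation directly in one linear pass instead of applying each
-- adjacent swap to an identity list via a lst.index scan (return value only; A's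
-- helper mutates its list argument in place, B performs no observable mutation of inputs).

-- ===== PORT A =====
-- one iteration of apply_swaps' for-loop; the lst[index+1] accesses are guarded by
-- 'index < len(lst) - 1', so pyGetD with default 0 is exact there
def applySwapsStep (l : List Int) (p : Int × Int) : List Int :=
  match PySem.List.index? l p.1 with
  | none => l  -- except ValueError: continue
  | some idx =>
    if (idx : Int) < (l.length : Int) - 1 ∧ PySem.List.pyGetD l ((idx : Int) + 1) 0 = p.2 then
      -- lst[index], lst[index+1] = lst[index+1], lst[index]
      (l.set idx (PySem.List.pyGetD l ((idx : Int) + 1) 0)).set (idx + 1)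
        (PySem.List.pyGetD l (idx : Int) 0)
    else l

def apply_swaps (lst : List Int) (swaps : List (Int × Int)) : List Int :=
  swaps.foldl applySwapsStep lst

def initialize_lists_and_pairs (k : Int) : List Int × List Int :=
  let k_minus := k - 1
  let list_1 := PySem.List.pyRange 1 (k_minus + 1) 1
  let list_2 := PySem.List.pyRange 1 (k_minus + 1) 1
  let swapped_pairs_1 := (PySem.List.pyRange 1 (k_minus - 1) 2).map (fun i => (i, i + 1))
  let swapped_pairs_2 := (PySem.List.pyRange 2 k_minus 2).map (fun i => (i, i + 1))
  let swapped_pairs_1 := if PySem.Int.mod k_minus 2 = 0 then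
      (PySem.List.pyRange 1 k_minus 2).map (fun i => (i, i + 1))
    else swapped_pairs_1
  (apply_swaps list_1 swapped_pairs_1, apply_swaps list_2 swapped_pairs_2)

-- ===== PORT B =====
-- the while-loop of B's helper 'swapped': append i+1, i per pair, then the leftover element
def altPairs (n i : Int) : List Int :=
  if _h : i + 1 ≤ n then (i + 1) :: i :: altPairs n (i + 2)
  else if i ≤ n then [i] else []
termination_by (n + 1 - i).toNat
decreasing_by omega

def initialize_lists_and_pairs_alt (k : Int) : List Int × List Int :=
  let n := k - 1
  (altPairs n 1, (if 1 ≤ n then [1] else []) ++ altPairs n 2)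

-- ===== PRECONDITION & SPEC =====
def Spec_initialize_lists_and_pairs (k : Int) (out : List Int × List Int) : Prop := out = initialize_lists_and_pairs_alt k
instance (k : Int) (out : List Int × List Int) : Decidable (Spec_initialize_lists_and_pairs k out) := by unfold Spec_initialize_lists_and_pairs; infer_instance

-- ===== CLAIM (what is proved, stated in full; the proofs are below) =====
def Claim_equal_initialize_lists_and_pairs : Prop := ∀ (k : Int), Dom_initialize_lists_and_pairs k → Spec_initialize_lists_and_pairs k (initialize_lists_and_pairs k)

-- ===== LEMMAS AND PROOFS =====

-- step-2 range induction forms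
theorem pyRange_two_eq_nil (a b : Int) (h : b ≤ a) : PySem.List.pyRange a b 2 = [] := by
  rw [PySem.List.pyRange_of_pos a b (by norm_num)]
  simp [show ¬ a < b by omega]

theorem pyRange_two_cons (a b : Int) (h : a < b) :
    PySem.List.pyRange a b 2 = a :: PySem.List.pyRange (a + 2) b 2 := by
  rw [PySem.List.pyRange_of_pos a b (by norm_num),
      PySem.List.pyRange_of_pos (a + 2) b (by norm_num)]
  have hN : (if a < b then ((b - a + 2 - 1) / 2).toNat else 0)
      = (if a + 2 < b then ((b - (a + 2) + 2 - 1) / 2).toNat else 0) + 1 := by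
    split_ifs <;> omega
  rw [hN, List.range_succ_eq_map, List.map_cons, List.map_map]
  have hf : ((fun k : Nat => a + 2 * (k : Int)) ∘ Nat.succ)
      = (fun k : Nat => a + 2 + 2 * (k : Int)) := by
    funext k; simp [Nat.succ_eq_add_one]; ring
  rw [hf]
  norm_num

-- range(1, n-1, 2) and range(1, n, 2) coincide when n is odd
theorem pyRange_two_odd (n : Int) (h : PySem.Int.mod n 2 ≠ 0) :
    PySem.List.pyRange 1 (n - 1) 2 = PySem.List.pyRange 1 n 2 := by
  have he : PySem.Int.mod n 2 = n % 2 := PySem.Int.mod_eq_emod_of_pos (by norm_num)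
  rw [he] at h
  rw [PySem.List.pyRange_of_pos 1 (n - 1) (by norm_num),
      PySem.List.pyRange_of_pos 1 n (by norm_num)]
  congr 2
  split_ifs <;> omega

-- first index of a in pre ++ a :: t when a is not in pre
theorem index?_append_cons (pre t : List Int) (a : Int) (ha : a ∉ pre) :
    PySem.List.index? (pre ++ a :: t) a = some pre.length := by
  rw [PySem.List.index?_eq_some_iff]
  exact ⟨pre, t, rfl, rfl, ha⟩

theorem getD_append_cons_fst (pre t : List Int) (a : Int) :
    (pre ++ a :: t).getD pre.length 0 = a := by
  induction pre with
  | nil => rfl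
  | cons x xs _ => simp

theorem getD_append_cons2_snd (pre t : List Int) (a b : Int) :
    (pre ++ a :: b :: t).getD (pre.length + 1) 0 = b := by
  induction pre with
  | nil => rfl
  | cons x xs _ => simp

theorem pyGetD_append_cons2_snd (pre t : List Int) (a b : Int) :
    PySem.List.pyGetD (pre ++ a :: b :: t) ((pre.length : Int) + 1) 0 = b := by
  have hcast : ((pre.length : Int) + 1) = ((pre.length + 1 : Nat) : Int) := by push_cast; ring
  rw [hcast, PySem.List.pyGetD_natCast]
  exact getD_append_cons2_snd pre t a b

theorem set_swap_append (pre : List Int) (a b : Int) (t : List Int) :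
    ((pre ++ a :: b :: t).set pre.length b).set (pre.length + 1) a = pre ++ b :: a :: t := by
  induction pre with
  | nil => simp
  | cons x xs _ => simp [List.set]

-- the apply_swaps loop over the pairs (i,i+1), i ∈ range(i0, n, 2), acting on
-- pre ++ [i0..n], produces pre ++ altPairs n i0 (all elements of pre are < i0)
theorem apply_swaps_main (n : Int) : ∀ i pre, 1 ≤ i → (∀ x ∈ pre, x < i) →
    apply_swaps (pre ++ PySem.List.pyRange i (n + 1) 1)
      ((PySem.List.pyRange i n 2).map (fun x => (x, x + 1))) = pre ++ altPairs n i := by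
  intro i pre h1 hpre
  by_cases hin : i < n
  · -- one successful swap, then recurse
    have hr2 : PySem.List.pyRange i n 2 = i :: PySem.List.pyRange (i + 2) n 2 :=
      pyRange_two_cons i n hin
    have hr1 : PySem.List.pyRange i (n + 1) 1
        = i :: (i + 1) :: PySem.List.pyRange (i + 2) (n + 1) 1 := by
      rw [PySem.List.pyRange_one_cons (by omega), PySem.List.pyRange_one_cons (by omega),
          show i + 1 + 1 = i + 2 from by ring]
    have hstep : applySwapsStep (pre ++ i :: (i + 1) :: PySem.List.pyRange (i + 2) (n + 1) 1)
        (i, i + 1) = (pre ++ [i + 1, i]) ++ PySem.List.pyRange (i + 2) (n + 1) 1 := by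
      unfold applySwapsStep
      rw [index?_append_cons pre _ i (fun hm => absurd (hpre i hm) (lt_irrefl i))]
      dsimp only
      rw [pyGetD_append_cons2_snd]
      rw [if_pos ⟨by simp only [List.length_append, List.length_cons]; push_cast; omega, rfl⟩]
      have hfst : PySem.List.pyGetD
          (pre ++ i :: (i + 1) :: PySem.List.pyRange (i + 2) (n + 1) 1) ((pre.length : Int)) 0
          = i := by
        rw [PySem.List.pyGetD_natCast]
        exact getD_append_cons_fst _ _ _
      rw [hfst, set_swap_append]
      simp [List.append_assoc]
    have ih := apply_swaps_main n (i + 2) (pre ++ [i + 1, i]) (by omega)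
      (by intro x hx
          rcases List.mem_append.mp hx with hx | hx
          · exact lt_trans (hpre x hx) (by omega)
          · simp at hx; omega)
    have cons_eq : ∀ (l : List Int) p ps,
        apply_swaps l (p :: ps) = apply_swaps (applySwapsStep l p) ps := fun _ _ _ => rfl
    rw [hr2, hr1, List.map_cons, cons_eq, hstep, ih]
    conv_rhs => rw [altPairs]
    rw [dif_pos (show i + 1 ≤ n from by omega)]
    simp [List.append_assoc]
  · -- no pairs left: altPairs n i is exactly the untouched tail [i..n]
    rw [pyRange_two_eq_nil i n (by omega)]
    have nil_eq : ∀ (l : List Int), apply_swaps l [] = l := fun _ => rfl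
    rw [List.map_nil, nil_eq]
    congr 1
    rw [altPairs, dif_neg (show ¬ i + 1 ≤ n from by omega)]
    by_cases hi : i ≤ n
    · have : i = n := by omega
      subst this
      rw [if_pos le_rfl, PySem.List.pyRange_one_singleton]
    · rw [if_neg hi, PySem.List.pyRange_one_eq_nil (by omega)]
termination_by i => (n + 1 - i).toNat
decreasing_by omega

-- ===== VERDICT (by name: the statement is the Claim_ definition above) =====
theorem initialize_lists_and_pairs_spec : Claim_equal_initialize_lists_and_pairs := by
  intro k _
  unfold Spec_initialize_lists_and_pairs initialize_lists_and_pairs initialize_lists_and_pairs_alt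
  simp only [Prod.mk.injEq]
  set n := k - 1 with hn
  refine ⟨?_, ?_⟩
  · -- list_1: pairs start at 1; the two parity branches use the same effective range
    by_cases hpar : PySem.Int.mod n 2 = 0
    · rw [if_pos hpar]
      simpa using apply_swaps_main n 1 [] (by norm_num) (by simp)
    · rw [if_neg hpar, pyRange_two_odd n hpar]
      simpa using apply_swaps_main n 1 [] (by norm_num) (by simp)
  · -- list_2: pairs start at 2; peel off the untouched leading 1 when n ≥ 1
    by_cases hn1 : (1 : Int) ≤ n
    · rw [if_pos hn1, PySem.List.pyRange_one_cons (show (1 : Int) < n + 1 from by omega),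
          show (1 : Int) + 1 = 2 from by norm_num]
      simpa using apply_swaps_main n 2 [1] (by norm_num)
        (by intro x hx; simp at hx; omega)
    · rw [if_neg hn1, PySem.List.pyRange_one_eq_nil (by omega), pyRange_two_eq_nil 2 n (by omega)]
      have nil_eq : ∀ (l : List Int), apply_swaps l [] = l := fun _ => rfl
      rw [List.map_nil, nil_eq, List.nil_append, altPairs,
          dif_neg (show ¬ (2 : Int) + 1 ≤ n from by omega), if_neg (by omega)]
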